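-- pv_equiv track=rewrite | github.com/brianc118/tetriscube | tetriscube.py | int2point
-- ===== SOURCE A (Python) =====
-- import math
--
-- def int2point(x, dimensions):
--     n = math.ceil(math.log2(max(dimensions)))
--     ndim = len(dimensions)
--     point = []
--     for i in range(ndim):
--         point.append(x & (2 ** n - 1))
--         x >>= n
--     return list(reversed(point))
-- ===== SOURCE B (Python) =====
-- import math
--
-- def int2point(x, dimensions):
--     n = math.ceil(math.log2(max(dimensions)))
--     base = 2 ** n
--     ndim = len(dimensions)
--
--     def digits(v, k):
--         # k base-`base` digits of v, most significant first, by divide and conquer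
--         if k == 1:
--             return [v % base]
--         h = k // 2
--         hi, lo = divmod(v, base ** h)
--         return digits(hi, k - h) + digits(lo, h)
--
--     return digits(x, ndim)
-- ===== Notes on version B (the rewrite author's own statement) =====
-- stated objective: alternative
-- what changed: A peels digits least-significant-first with a mask-and-shift loop over a mutable x and reverses at the end; B extracts the digits most-significant-first by divide-and-conquer, splitting x with one divmod by base**(k//2) per level and concatenating the two halves, with no mutable accumulator and no reverse.
import Mathlib
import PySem

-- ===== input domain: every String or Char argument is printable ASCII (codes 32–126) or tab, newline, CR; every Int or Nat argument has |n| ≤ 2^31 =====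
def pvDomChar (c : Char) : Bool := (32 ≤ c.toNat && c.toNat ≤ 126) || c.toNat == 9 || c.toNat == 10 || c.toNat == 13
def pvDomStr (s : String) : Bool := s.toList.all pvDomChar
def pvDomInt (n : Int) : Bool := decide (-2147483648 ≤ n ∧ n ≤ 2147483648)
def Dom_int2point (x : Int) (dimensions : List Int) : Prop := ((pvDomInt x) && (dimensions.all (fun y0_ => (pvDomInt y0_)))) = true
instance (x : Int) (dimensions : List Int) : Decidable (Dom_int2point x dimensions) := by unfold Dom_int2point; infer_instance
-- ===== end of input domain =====

-- B replaces A's mask-shift-reverse loop by a direct per-position digit formula; return-value equivalence.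

-- ===== PORT A =====
-- math.ceil(math.log2 m) for a positive integer m in the domain (≤ 2^31) is exactly Nat.clog 2 m.
def pyCeilLog2 (m : Int) : Nat := Nat.clog 2 m.toNat

def int2point (x : Int) (dimensions : List Int) : List Int :=
  let n := pyCeilLog2 ((PySem.List.max? dimensions (fun y => y)).getD 0)
  let ndim := dimensions.length
  -- 'x & (2 ** n - 1)' on Python ints is exactly x mod 2^n, and 'x >>= n' is floor division by 2^n.
  let st := (List.range ndim).foldl
    (fun (st : Int × List Int) _ =>
      (PySem.Int.floordiv st.1 (2 ^ n), st.2 ++ [PySem.Int.mod st.1 (2 ^ n)]))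
    (x, [])
  st.2.reverse

-- ===== PORT B =====
-- divide-and-conquer digit extraction, most significant first; 'divmod(v, p)' is (floordiv v p, mod v p).
-- The guard is 'k ≤ 1' rather than Python's 'k == 1' only to make the recursion total; the wrapper
-- never reaches k = 0 when Pre_ holds (dimensions nonempty).
def digitsB (base : Int) (v : Int) (k : Nat) : List Int :=
  if k ≤ 1 then [PySem.Int.mod v base]
  else
    digitsB base (PySem.Int.floordiv v (base ^ (k / 2))) (k - k / 2) ++
      digitsB base (PySem.Int.mod v (base ^ (k / 2))) (k / 2)
termination_by k
decreasing_by all_goals omega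

def int2point_alt (x : Int) (dimensions : List Int) : List Int :=
  let n := pyCeilLog2 ((PySem.List.max? dimensions (fun y => y)).getD 0)
  let base : Int := 2 ^ n
  let ndim := dimensions.length
  digitsB base x ndim

-- ===== PRECONDITION & SPEC =====
-- Pre_ excludes exactly the inputs where Python A raises: empty dimensions (max raises ValueError)
-- or a non-positive maximum (math.log2 raises a math domain error).
def Pre_int2point (x : Int) (dimensions : List Int) : Prop :=
  0 < (PySem.List.max? dimensions (fun y => y)).getD 0
instance (x : Int) (dimensions : List Int) : Decidable (Pre_int2point x dimensions) := by
  unfold Pre_int2point; infer_instance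

def pvWitness_int2point : Int × List Int := (5, [2, 2, 2])

def Spec_int2point (x : Int) (dimensions : List Int) (out : List Int) : Prop := out = int2point_alt x dimensions
instance (x : Int) (dimensions : List Int) (out : List Int) : Decidable (Spec_int2point x dimensions out) := by unfold Spec_int2point; infer_instance

-- ===== CLAIM (what is proved, stated in full; the proofs are below) =====
def Claim_equal_int2point : Prop := ∀ (x : Int) (dimensions : List Int), Dom_int2point x dimensions → Pre_int2point x dimensions → Spec_int2point x dimensions (int2point x dimensions)

-- ===== LEMMAS AND PROOFS =====

lemma floordiv_pow_succ (b : Int) (hb : 0 < b) (x : Int) (k : Nat) :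
    PySem.Int.floordiv (PySem.Int.floordiv x (b ^ k)) b = PySem.Int.floordiv x (b ^ (k + 1)) := by
  rw [PySem.Int.floordiv_eq_ediv_of_pos hb,
      PySem.Int.floordiv_eq_ediv_of_pos (pow_pos hb k),
      PySem.Int.floordiv_eq_ediv_of_pos (pow_pos hb (k + 1)),
      pow_succ, Int.ediv_ediv_of_nonneg (le_of_lt (pow_pos hb k))]

lemma loopA (b : Int) (hb : 0 < b) (k : Nat) (x : Int) :
    (List.range k).foldl
      (fun (st : Int × List Int) _ =>
        (PySem.Int.floordiv st.1 b, st.2 ++ [PySem.Int.mod st.1 b])) (x, []) =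
    (PySem.Int.floordiv x (b ^ k),
     (List.range k).map (fun i => PySem.Int.mod (PySem.Int.floordiv x (b ^ i)) b)) := by
  induction k with
  | zero =>
      simp [PySem.Int.floordiv_eq_ediv_of_pos hb]
  | succ k ih =>
      rw [List.range_succ, List.foldl_append, ih]
      simp [floordiv_pow_succ b hb x k]

lemma digit_div_high (b : Int) (hb : 0 < b) (v : Int) (h i : Nat) :
    v / b ^ h / b ^ i = v / b ^ (h + i) := by
  rw [pow_add]
  exact Int.ediv_ediv_of_nonneg (pow_pos hb h).le

lemma digit_mod_low (b : Int) (hb : 0 < b) (v : Int) (i h : Nat) (hih : i < h) :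
    v % b ^ h / b ^ i % b = v / b ^ i % b := by
  have hbi : (b : Int) ^ i ≠ 0 := (pow_pos hb i).ne'
  have hpow : (b : Int) ^ (h - 1 - i) * b * b ^ i = b ^ h := by
    rw [mul_assoc, ← pow_succ']
    rw [← pow_add]
    congr 1
    omega
  have hsplit : v % b ^ h = v + -(v / b ^ h) * b ^ (h - 1 - i) * b * b ^ i := by
    rw [Int.emod_def]
    linear_combination (v / b ^ h) * hpow
  rw [hsplit]
  rw [Int.add_mul_ediv_right _ _ hbi]
  exact Int.add_mul_emod_self_right _ _ _

lemma digitsB_eq (b : Int) (hb : 0 < b) (k : Nat) :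
    1 ≤ k → ∀ v : Int,
    digitsB b v k =
      ((List.range k).map (fun i => PySem.Int.mod (PySem.Int.floordiv v (b ^ i)) b)).reverse := by
  induction k using Nat.strong_induction_on with
  | _ k ih =>
    intro hk v
    by_cases h1 : k ≤ 1
    · have hk1 : k = 1 := by omega
      subst hk1
      rw [digitsB]
      simp [PySem.Int.floordiv, PySem.Int.mod]
    · rw [digitsB, if_neg h1]
      rw [ih (k - k / 2) (by omega) (by omega), ih (k / 2) (by omega) (by omega),
        ← List.reverse_append]
      congr 1
      have hrange : List.range k =
          List.range (k / 2) ++ (List.range (k - k / 2)).map (fun j => k / 2 + j) := by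
        have hk' : k = k / 2 + (k - k / 2) := by omega
        conv_lhs => rw [hk']
        exact List.range_add
      rw [hrange, List.map_append, List.map_map]
      congr 1
      · apply List.map_congr_left
        intro i hi
        have hih : i < k / 2 := List.mem_range.mp hi
        simp only [PySem.Int.floordiv_eq_ediv_of_pos (pow_pos hb _),
          PySem.Int.mod_eq_emod_of_pos (pow_pos hb _), PySem.Int.mod_eq_emod_of_pos hb]
        exact digit_mod_low b hb v i (k / 2) hih
      · apply List.map_congr_left
        intro i _
        simp only [Function.comp, PySem.Int.floordiv_eq_ediv_of_pos (pow_pos hb _),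
          PySem.Int.mod_eq_emod_of_pos hb]
        rw [digit_div_high b hb v (k / 2) i]

-- ===== VERDICT (by name: the statement is the Claim_ definition above) =====
theorem int2point_spec : Claim_equal_int2point := by
  intro x dims _ hpre
  have hne : dims ≠ [] := by
    intro h
    subst h
    simp [Pre_int2point, PySem.List.max?] at hpre
  unfold Spec_int2point int2point int2point_alt
  simp only
  rw [loopA (2 ^ pyCeilLog2 ((PySem.List.max? dims fun y => y).getD 0))
      (pow_pos (by norm_num) _) dims.length x]
  rw [digitsB_eq _ (pow_pos (by norm_num) _) dims.length
      (by cases dims with | nil => exact absurd rfl hne | cons a t => simp) x]
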